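-- pv_equiv track=rewrite | github.com/cirosantilli/project-euler-solutions | solvers/875.py | q_prime_power_mod
-- ===== SOURCE A (Python) =====
-- MOD = 1001961001
--
-- def q_prime_power_mod(p: int, k: int, mod: int = MOD) -> int:
--     """Return q(p^k) modulo mod, where p is prime and k>=1.
--
--     Using Gauss-sum magnitude classification, one can show:
--       For odd p:
--         q(p^k) = p^(7k) + (p-1)*p^(4k-1) * sum_{j=0..k-1} p^(3j)
--       For p=2:
--         q(2) = 128
--         For k>=2:
--           q(2^k) = 2^(7k) + 2^(4k+3) * sum_{j=0..k-2} 2^(3j)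
--
--     These identities are integer-valued; we compute them directly modulo mod
--     without any modular division.
--     """
--
--     if p == 2:
--         if k == 1:
--             return 128 % mod
--         # Geometric series: 1 + 2^3 + ... + 2^{3(k-2)}
--         r = 8 % mod
--         g = 0
--         cur = 1
--         for _ in range(k - 1):
--             g += cur
--             if g >= mod:
--                 g -= mod
--             cur = (cur * r) % mod
--         term1 = pow(2, 7 * k, mod)
--         term2 = (pow(2, 4 * k + 3, mod) * g) % mod
--         return (term1 + term2) % mod
--
--     # Odd prime
--     if k == 1:
--         # q(p) = p^7 + p^4 - p^3
--         p2 = (p * p) % mod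
--         p3 = (p2 * p) % mod
--         p4 = (p2 * p2) % mod
--         p7 = (p4 * p3) % mod
--         return (p7 + p4 - p3) % mod
--
--     r = pow(p, 3, mod)
--     g = 0
--     cur = 1
--     for _ in range(k):
--         g += cur
--         if g >= mod:
--             g -= mod
--         cur = (cur * r) % mod
--
--     term1 = pow(p, 7 * k, mod)
--     termp = pow(p, 4 * k - 1, mod)
--     term2 = ((p - 1) % mod) * termp % mod * g % mod
--     return (term1 + term2) % mod
-- ===== SOURCE B (Python) =====
-- MOD = 1001961001
--
-- def _geo(r, n, mod):
--     # sum_{j=0}^{n-1} r^j modulo mod, by recursive doubling: O(log n) steps.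
--     if n == 0:
--         return 0
--     if n % 2:
--         return (1 + r * _geo(r, n - 1, mod)) % mod
--     h = n // 2
--     s = _geo(r, h, mod)
--     return (s * (1 + pow(r, h, mod))) % mod
--
-- def q_prime_power_mod(p: int, k: int, mod: int = MOD) -> int:
--     """Return q(p^k) modulo mod, where p is prime and k>=1.
--
--     Same closed identities as before, but the geometric series is summed by
--     recursive doubling instead of a linear loop, and the k == 1 cases fall out
--     of the general formula (the series is empty or a single 1), so no special
--     cases are needed.
--     """
--     if p == 2:
--         return (pow(2, 7 * k, mod) + pow(2, 4 * k + 3, mod) * _geo(8, k - 1, mod)) % mod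
--     return (pow(p, 7 * k, mod)
--             + (p - 1) * pow(p, 4 * k - 1, mod) * _geo(pow(p, 3, mod), k, mod)) % mod
-- ===== Notes on version B (the rewrite author's own statement) =====
-- stated objective: faster
-- what changed: The geometric series sum_{j} r^(3j) mod m is computed by recursive doubling (S(2h)=S(h)*(1+r^h)) instead of A's k-step accumulation loop, and A's two k==1 special cases are dropped because they fall out of the general formula (empty or singleton series).
-- outside the precondition, e.g. on q_prime_power_mod(-1, -1, -1): A returns 0, B raises RecursionError; on q_prime_power_mod(3, 0, 7): A returns 1, B returns 1
import Mathlib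
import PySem

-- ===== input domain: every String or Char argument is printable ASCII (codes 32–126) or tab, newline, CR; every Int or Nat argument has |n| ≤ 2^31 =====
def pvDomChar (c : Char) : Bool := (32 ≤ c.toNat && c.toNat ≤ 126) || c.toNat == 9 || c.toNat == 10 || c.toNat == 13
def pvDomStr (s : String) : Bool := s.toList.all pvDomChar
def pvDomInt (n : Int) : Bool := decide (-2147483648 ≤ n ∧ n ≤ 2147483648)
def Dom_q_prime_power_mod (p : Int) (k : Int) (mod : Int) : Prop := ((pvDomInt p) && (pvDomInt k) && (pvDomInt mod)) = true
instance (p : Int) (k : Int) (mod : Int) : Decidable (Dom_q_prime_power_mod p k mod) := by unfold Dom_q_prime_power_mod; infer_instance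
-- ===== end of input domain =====

-- B replaces A's linear-in-k geometric-series loop by a recursive-doubling sum
-- (O(log k) multiplications) and drops A's k == 1 special cases, which fall out
-- of the general formula.

-- ===== PORT A =====
-- A's geometric-series loop: state (g, cur); one iteration = one pass of the Python body.
def pvALoop (r m : Int) (n : Nat) : Int × Int :=
  (List.range n).foldl (fun s _ =>
    let g := s.1 + s.2
    let g := if g ≥ m then g - m else g
    (g, PySem.Int.mod (s.2 * r) m)) (0, 1)

def q_prime_power_mod (p : Int) (k : Int) (mod : Int) : Int :=
  if p = 2 then
    if k = 1 then PySem.Int.mod 128 mod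
    else
      let r := PySem.Int.mod 8 mod
      let g := (pvALoop r mod (k - 1).toNat).1
      let term1 := PySem.Int.powMod 2 (7 * k).toNat mod
      let term2 := PySem.Int.mod (PySem.Int.powMod 2 (4 * k + 3).toNat mod * g) mod
      PySem.Int.mod (term1 + term2) mod
  else if k = 1 then
    let p2 := PySem.Int.mod (p * p) mod
    let p3 := PySem.Int.mod (p2 * p) mod
    let p4 := PySem.Int.mod (p2 * p2) mod
    let p7 := PySem.Int.mod (p4 * p3) mod
    PySem.Int.mod (p7 + p4 - p3) mod
  else
    let r := PySem.Int.powMod p 3 mod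
    let g := (pvALoop r mod k.toNat).1
    let term1 := PySem.Int.powMod p (7 * k).toNat mod
    let termp := PySem.Int.powMod p (4 * k - 1).toNat mod
    let term2 := PySem.Int.mod (PySem.Int.mod (PySem.Int.mod (p - 1) mod * termp) mod * g) mod
    PySem.Int.mod (term1 + term2) mod

-- ===== PORT B =====
-- B's _geo: sum_{j<n} r^j mod m by recursive doubling.  Python tests 'n == 0';
-- the 'n ≤ 0' guard only makes the recursion total (n < 0 is never reached under Pre_).
def pvGeo (r n m : Int) : Int :=
  if n ≤ 0 then 0
  else if PySem.Int.mod n 2 ≠ 0 then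
    PySem.Int.mod (1 + r * pvGeo r (n - 1) m) m
  else
    let h := PySem.Int.floordiv n 2
    let s := pvGeo r h m
    PySem.Int.mod (s * (1 + PySem.Int.powMod r h.toNat m)) m
termination_by n.toNat
decreasing_by
  · omega
  · simp only [PySem.Int.floordiv_eq_ediv_of_pos (by norm_num : (0:Int) < 2)]; omega

def q_prime_power_mod_alt (p : Int) (k : Int) (mod : Int) : Int :=
  if p = 2 then
    PySem.Int.mod
      (PySem.Int.powMod 2 (7 * k).toNat mod
        + PySem.Int.powMod 2 (4 * k + 3).toNat mod * pvGeo 8 (k - 1) mod) mod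
  else
    PySem.Int.mod
      (PySem.Int.powMod p (7 * k).toNat mod
        + (p - 1) * PySem.Int.powMod p (4 * k - 1).toNat mod
            * pvGeo (PySem.Int.powMod p 3 mod) k mod) mod

-- ===== PRECONDITION & SPEC =====
-- Pre_ excludes mod = 0, where A raises ZeroDivisionError, and k ≤ 0, outside the
-- docstring's domain k >= 1: there A feeds negative exponents to pow (modular
-- inverse, or ValueError) while B's doubling recursion does not terminate.
def Pre_q_prime_power_mod (p : Int) (k : Int) (mod : Int) : Prop := 1 ≤ k ∧ mod ≠ 0
instance (p : Int) (k : Int) (mod : Int) : Decidable (Pre_q_prime_power_mod p k mod) := by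
  unfold Pre_q_prime_power_mod; infer_instance

def pvWitness_q_prime_power_mod : Int × Int × Int := (3, 2, 5)

def Spec_q_prime_power_mod (p : Int) (k : Int) (mod : Int) (out : Int) : Prop := out = q_prime_power_mod_alt p k mod
instance (p : Int) (k : Int) (mod : Int) (out : Int) : Decidable (Spec_q_prime_power_mod p k mod out) := by unfold Spec_q_prime_power_mod; infer_instance

-- ===== CLAIM (what is proved, stated in full; the proofs are below) =====
def Claim_equal_q_prime_power_mod : Prop := ∀ (p : Int) (k : Int) (mod : Int), Dom_q_prime_power_mod p k mod → Pre_q_prime_power_mod p k mod → Spec_q_prime_power_mod p k mod (q_prime_power_mod p k mod)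

-- ===== LEMMAS AND PROOFS =====

-- the exact geometric partial sum both programs compute modulo m
def pvS (b : Int) (n : Nat) : Int := ∑ j ∈ Finset.range n, b ^ j

theorem pvS_succ (b : Int) (n : Nat) : pvS b (n + 1) = 1 + b * pvS b n := by
  simp [pvS, geom_sum_succ]; ring

theorem pvS_add (b : Int) (m n : Nat) : pvS b (m + n) = pvS b m + b ^ m * pvS b n := by
  simp [pvS, Finset.sum_range_add, Finset.mul_sum, pow_add]

-- Python's % result is congruent to its argument (any modulus)
theorem pvModSelf (a m : Int) : PySem.Int.mod a m ≡ a [ZMOD m] :=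
  Int.modEq_iff_dvd.mpr
    ((by linarith [PySem.Int.floordiv_mul_add_mod a m] :
        a - PySem.Int.mod a m = PySem.Int.floordiv a m * m) ▸
      dvd_mul_left m (PySem.Int.floordiv a m))

theorem pvModCong {m a a' : Int} (h : a ≡ a' [ZMOD m]) :
    PySem.Int.mod a m ≡ a' [ZMOD m] := (pvModSelf a m).trans h

-- congruent arguments give the same Python % value (m ≠ 0)
theorem pvModEqOfModEq {m : Int} (hm : m ≠ 0) {X Y : Int} (h : X ≡ Y [ZMOD m]) :
    PySem.Int.mod X m = PySem.Int.mod Y m := by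
  have hd : m ∣ (PySem.Int.mod Y m - PySem.Int.mod X m) :=
    ((pvModSelf X m).trans (h.trans (pvModSelf Y m).symm)).dvd
  rcases lt_or_gt_of_ne hm with hneg | hpos
  · obtain ⟨hx1, hx2⟩ := PySem.Int.mod_neg_bounds X hneg
    obtain ⟨hy1, hy2⟩ := PySem.Int.mod_neg_bounds Y hneg
    have := Int.eq_zero_of_abs_lt_dvd ((neg_dvd).mpr hd) (by rw [abs_lt]; omega)
    omega
  · have hx1 := PySem.Int.mod_nonneg X hpos
    have hx2 := PySem.Int.mod_lt X hpos
    have hy1 := PySem.Int.mod_nonneg Y hpos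
    have hy2 := PySem.Int.mod_lt Y hpos
    have := Int.eq_zero_of_abs_lt_dvd hd (by rw [abs_lt]; omega)
    omega

theorem pvALoop_congr (r b m : Int) (hr : r ≡ b [ZMOD m]) (n : Nat) :
    (pvALoop r m n).1 ≡ pvS b n [ZMOD m] ∧ (pvALoop r m n).2 ≡ b ^ n [ZMOD m] := by
  induction n with
  | zero => simp [pvALoop, pvS, Int.ModEq.refl]
  | succ n ih =>
    obtain ⟨ihg, ihc⟩ := ih
    have hstep : pvALoop r m (n + 1) =
        (let g := (pvALoop r m n).1 + (pvALoop r m n).2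
         let g := if g ≥ m then g - m else g
         (g, PySem.Int.mod ((pvALoop r m n).2 * r) m)) := by
      simp [pvALoop, List.range_succ]
    rw [hstep]
    constructor
    · show (if (pvALoop r m n).1 + (pvALoop r m n).2 ≥ m then
              (pvALoop r m n).1 + (pvALoop r m n).2 - m
            else (pvALoop r m n).1 + (pvALoop r m n).2) ≡ pvS b (n + 1) [ZMOD m]
      have hsum : (pvALoop r m n).1 + (pvALoop r m n).2 ≡ pvS b (n + 1) [ZMOD m] := by
        have : pvS b (n + 1) = pvS b n + b ^ n := by simp [pvS, Finset.sum_range_succ]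
        rw [this]; exact ihg.add ihc
      split_ifs with h
      · exact Int.ModEq.trans (Int.sub_emod_right _ m) hsum
      · exact hsum
    · show PySem.Int.mod ((pvALoop r m n).2 * r) m ≡ b ^ (n + 1) [ZMOD m]
      exact (pow_succ b n) ▸ pvModCong (ihc.mul hr)

theorem pvGeo_congr (r b m : Int) (hr : r ≡ b [ZMOD m]) :
    ∀ n : Nat, pvGeo r (n : Int) m ≡ pvS b n [ZMOD m] := by
  intro n
  induction n using Nat.strong_induction_on with
  | _ n ih =>
    rw [pvGeo]
    by_cases h0 : n = 0
    · subst h0; simp [pvS]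
    · rw [if_neg (by omega : ¬ (n : Int) ≤ 0)]
      have hmod2 : PySem.Int.mod (n : Int) 2 = ((n % 2 : Nat) : Int) := by
        exact_mod_cast PySem.Int.mod_natCast n 2
      by_cases hodd : n % 2 = 1
      · rw [if_pos (by rw [hmod2, hodd]; norm_num)]
        have hcast : (n : Int) - 1 = ((n - 1 : Nat) : Int) := by omega
        have hih := ih (n - 1) (by omega)
        rw [hcast]
        have : pvS b n = 1 + b * pvS b (n - 1) := by
          have := pvS_succ b (n - 1)
          rw [show n - 1 + 1 = n by omega] at this
          exact this
        rw [this]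
        exact pvModCong ((Int.ModEq.refl 1).add (hr.mul hih))
      · rw [if_neg (by rw [hmod2]; omega)]
        have hdiv : PySem.Int.floordiv (n : Int) 2 = ((n / 2 : Nat) : Int) := by
          exact_mod_cast PySem.Int.floordiv_natCast n 2
        rw [hdiv]
        have hih := ih (n / 2) (by omega)
        have hpow : PySem.Int.powMod r (((n / 2 : Nat) : Int)).toNat m ≡ b ^ (n / 2) [ZMOD m] := by
          rw [PySem.Int.powMod_eq, Int.toNat_natCast]
          exact pvModCong (hr.pow _)
        have hS : pvS b n = pvS b (n / 2) * (1 + b ^ (n / 2)) := by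
          have := pvS_add b (n / 2) (n / 2)
          rw [show n / 2 + n / 2 = n by omega] at this
          rw [this]; ring
        rw [hS]
        show PySem.Int.mod (pvGeo r ((n / 2 : Nat) : Int) m
              * (1 + PySem.Int.powMod r (((n / 2 : Nat) : Int)).toNat m)) m
            ≡ pvS b (n / 2) * (1 + b ^ (n / 2)) [ZMOD m]
        exact pvModCong (hih.mul ((Int.ModEq.refl 1).add hpow))

-- ===== VERDICT (by name: the statement is the Claim_ definition above) =====
theorem q_prime_power_mod_spec : Claim_equal_q_prime_power_mod := by
  intro p k m _hdom hpre
  obtain ⟨hk, hmne⟩ := hpre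
  have hP : ∀ a : Int, PySem.Int.mod a m ≡ a [ZMOD m] := fun a => pvModSelf a m
  unfold Spec_q_prime_power_mod q_prime_power_mod q_prime_power_mod_alt
  by_cases hp : p = 2
  · rw [if_pos hp, if_pos hp]
    by_cases hk1 : k = 1
    · rw [if_pos hk1]
      subst hk1
      have hgeo0 : pvGeo 8 (1 - 1) m = 0 := by rw [pvGeo]; norm_num
      simp only [PySem.Int.powMod_eq, hgeo0, mul_zero, add_zero]
      exact pvModEqOfModEq hmne
        ((show ((2 : Int) ^ ((7 : Int) * 1).toNat) = 128 by decide) ▸ (hP _).symm)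
    · rw [if_neg hk1]
      simp only [PySem.Int.powMod_eq]
      have hg : (pvALoop (PySem.Int.mod 8 m) m (k - 1).toNat).1
          ≡ pvS 8 (k - 1).toNat [ZMOD m] :=
        (pvALoop_congr (PySem.Int.mod 8 m) 8 m (hP 8) (k - 1).toNat).1
      have hG : pvGeo 8 (k - 1) m ≡ pvS 8 (k - 1).toNat [ZMOD m] := by
        rw [show (k - 1 : Int) = (((k - 1).toNat : Nat) : Int) by omega]
        exact pvGeo_congr 8 8 m (Int.ModEq.refl 8) (k - 1).toNat
      have hA : PySem.Int.mod ((2 : Int) ^ (7 * k).toNat) m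
            + PySem.Int.mod (PySem.Int.mod ((2 : Int) ^ (4 * k + 3).toNat) m
                * (pvALoop (PySem.Int.mod 8 m) m (k - 1).toNat).1) m
          ≡ 2 ^ (7 * k).toNat + 2 ^ (4 * k + 3).toNat * pvS 8 (k - 1).toNat [ZMOD m] :=
        (hP _).add (pvModCong ((hP _).mul hg))
      have hB : PySem.Int.mod ((2 : Int) ^ (7 * k).toNat) m
            + PySem.Int.mod ((2 : Int) ^ (4 * k + 3).toNat) m * pvGeo 8 (k - 1) m
          ≡ 2 ^ (7 * k).toNat + 2 ^ (4 * k + 3).toNat * pvS 8 (k - 1).toNat [ZMOD m] :=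
        (hP _).add ((hP _).mul hG)
      exact pvModEqOfModEq hmne (hA.trans hB.symm)
  · rw [if_neg hp, if_neg hp]
    have hG : pvGeo (PySem.Int.mod (p ^ 3) m) k m ≡ pvS (p ^ 3) k.toNat [ZMOD m] := by
      rw [show (k : Int) = ((k.toNat : Nat) : Int) by omega]
      exact pvGeo_congr (PySem.Int.mod (p ^ 3) m) (p ^ 3) m (hP (p ^ 3)) k.toNat
    by_cases hk1 : k = 1
    · rw [if_pos hk1]
      subst hk1
      simp only [PySem.Int.powMod_eq]
      have hS1 : pvS (p ^ 3) (1 : Int).toNat = 1 := by norm_num [pvS]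
      rw [hS1] at hG
      have hp2 : PySem.Int.mod (p * p) m ≡ p ^ 2 [ZMOD m] :=
        (show p * p = p ^ 2 by ring) ▸ hP (p * p)
      have hp3 : PySem.Int.mod (PySem.Int.mod (p * p) m * p) m ≡ p ^ 3 [ZMOD m] :=
        (show p ^ 2 * p = p ^ 3 by ring) ▸ pvModCong (hp2.mul (Int.ModEq.refl p))
      have hp4 : PySem.Int.mod (PySem.Int.mod (p * p) m * PySem.Int.mod (p * p) m) m
          ≡ p ^ 4 [ZMOD m] :=
        (show p ^ 2 * p ^ 2 = p ^ 4 by ring) ▸ pvModCong (hp2.mul hp2)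
      have hp7 : PySem.Int.mod
            (PySem.Int.mod (PySem.Int.mod (p * p) m * PySem.Int.mod (p * p) m) m
              * PySem.Int.mod (PySem.Int.mod (p * p) m * p) m) m
          ≡ p ^ 7 [ZMOD m] :=
        (show p ^ 4 * p ^ 3 = p ^ 7 by ring) ▸ pvModCong (hp4.mul hp3)
      have hA := (hp7.add hp4).sub hp3
      have hB : PySem.Int.mod (p ^ ((7 : Int) * 1).toNat) m
            + (p - 1) * PySem.Int.mod (p ^ ((4 : Int) * 1 - 1).toNat) m
                * pvGeo (PySem.Int.mod (p ^ 3) m) 1 m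
          ≡ p ^ 7 + p ^ 4 - p ^ 3 [ZMOD m] :=
        (show p ^ 7 + (p - 1) * p ^ 3 * 1 = p ^ 7 + p ^ 4 - p ^ 3 by ring) ▸
          (((show p ^ ((7 : Int) * 1).toNat = p ^ 7 by rw [show ((7 : Int) * 1).toNat = 7 from rfl]) ▸ hP (p ^ ((7 : Int) * 1).toNat)).add
            (((Int.ModEq.refl (p - 1)).mul
              ((show p ^ ((4 : Int) * 1 - 1).toNat = p ^ 3 by rw [show ((4 : Int) * 1 - 1).toNat = 3 from rfl]) ▸
                hP (p ^ ((4 : Int) * 1 - 1).toNat))).mul hG))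
      exact pvModEqOfModEq hmne (hA.trans hB.symm)
    · rw [if_neg hk1]
      simp only [PySem.Int.powMod_eq]
      have hg : (pvALoop (PySem.Int.mod (p ^ 3) m) m k.toNat).1
          ≡ pvS (p ^ 3) k.toNat [ZMOD m] :=
        (pvALoop_congr (PySem.Int.mod (p ^ 3) m) (p ^ 3) m (hP (p ^ 3)) k.toNat).1
      have hA : PySem.Int.mod (p ^ (7 * k).toNat) m
            + PySem.Int.mod (PySem.Int.mod (PySem.Int.mod (p - 1) m
                  * PySem.Int.mod (p ^ (4 * k - 1).toNat) m) m
                * (pvALoop (PySem.Int.mod (p ^ 3) m) m k.toNat).1) m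
          ≡ p ^ (7 * k).toNat + (p - 1) * p ^ (4 * k - 1).toNat * pvS (p ^ 3) k.toNat [ZMOD m] :=
        (hP _).add (pvModCong ((pvModCong ((hP _).mul (hP _))).mul hg))
      have hB : PySem.Int.mod (p ^ (7 * k).toNat) m
            + (p - 1) * PySem.Int.mod (p ^ (4 * k - 1).toNat) m
                * pvGeo (PySem.Int.mod (p ^ 3) m) k m
          ≡ p ^ (7 * k).toNat + (p - 1) * p ^ (4 * k - 1).toNat * pvS (p ^ 3) k.toNat [ZMOD m] :=
        (hP _).add (((Int.ModEq.refl (p - 1)).mul (hP _)).mul hG)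
      exact pvModEqOfModEq hmne (hA.trans hB.symm)
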